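-- pv_equiv track=rewrite | github.com/okmd/leetcode | string/encrypt-string-by-count.py | find_ecrypted_string
-- ===== SOURCE A (Python) =====
-- def find_ecrypted_string(string):
--     output = []
--     count, i = 1, 0
--     while i < len(string):
--         output.append(string[i])
--         while i < len(string)-1 and string[i] == string[i+1]:
--             count += 1
--             i += 1
--         # make sure number also get reversed as 15 become 51
--         output += [i for i in str(count)]
--         i += 1
--         count = 1
--     return "".join(reversed(output))
-- ===== SOURCE B (Python) =====
-- def find_ecrypted_string(string):
--     # Staged passes: comprehension of run-start indices, zip with the next
--     # start (or len) to get run lengths, join the forward RLE, reverse once.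
--     n = len(string)
--     starts = [i for i in range(n) if i == 0 or string[i] != string[i - 1]]
--     ends = starts[1:] + [n]
--     rle = "".join(string[s] + str(e - s) for s, e in zip(starts, ends))
--     return rle[::-1]
-- ===== Notes on version B (the rewrite author's own statement) =====
-- stated objective: alternative
-- what changed: B replaces A's nested while-loops (index scanning with a running count) by staged passes: a range comprehension collects run-start indices, zipping each start with the next start (or len) yields run lengths, the forward RLE is joined from these pairs and reversed once.
import Mathlib
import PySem

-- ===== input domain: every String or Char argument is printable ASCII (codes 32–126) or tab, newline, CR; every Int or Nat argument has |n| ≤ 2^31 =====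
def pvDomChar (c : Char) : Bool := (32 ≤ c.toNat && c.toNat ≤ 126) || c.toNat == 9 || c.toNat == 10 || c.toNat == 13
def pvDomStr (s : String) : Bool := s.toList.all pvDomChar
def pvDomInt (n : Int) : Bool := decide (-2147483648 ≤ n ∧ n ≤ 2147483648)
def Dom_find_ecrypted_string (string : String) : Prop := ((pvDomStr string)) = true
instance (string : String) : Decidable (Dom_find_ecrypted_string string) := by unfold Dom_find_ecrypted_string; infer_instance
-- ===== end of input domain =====

-- B computes run-start indices with a range comprehension, zips each start with the next
-- start (or len) to get run lengths, joins the forward RLE and reverses once; A scans with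
-- nested while-loops and a running count. Return values agree on all inputs.

-- ===== PORT A =====
-- inner while loop of A: state (count, i); advances while string[i] == string[i+1].
-- The Nat fuel is only a structural totality guard (the loop advances i each step, so
-- fuel = cs.length never runs out); it changes nothing on any input.
def pvAInner (cs : List Char) : Nat → Int → Nat → Int × Nat
  | 0, count, i => (count, i)
  | fuel + 1, count, i =>
    if i < cs.length - 1 ∧ cs[i]? = cs[i+1]? then
      pvAInner cs fuel (count + 1) (i + 1)
    else (count, i)

-- outer while loop of A: state (output, count, i); same fuel-as-totality-guard scheme
def pvAOuter (cs : List Char) : Nat → List Char → Int → Nat → List Char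
  | 0, output, _, _ => output
  | fuel + 1, output, count, i =>
    if i < cs.length then
      let c := cs.getD i default      -- string[i]; i < len here, so never the default
      let ci := pvAInner cs cs.length count i
      pvAOuter cs fuel (output ++ [c] ++ PySem.Int.toChars ci.1) 1 (ci.2 + 1)
    else output

def find_ecrypted_string (string : String) : String :=
  String.ofList ((pvAOuter string.toList string.toList.length [] 1 0).reverse)

-- ===== PORT B =====
-- starts = [i for i in range(n) if i == 0 or string[i] != string[i-1]]
-- (at i = 0 the first disjunct short-circuits, so the i-1 access is only used for i ≥ 1,
-- where it is in range; getD's default is never consulted on reachable indices)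
def pvStarts (cs : List Char) : List Nat :=
  (List.range cs.length).filter (fun i => i == 0 || cs.getD i default != cs.getD (i-1) default)

-- one item of the join: string[s] + str(e - s)
def pvPairEnc (cs : List Char) (se : Nat × Nat) : List Char :=
  cs.getD se.1 default :: PySem.Int.toChars ((se.2 : Int) - (se.1 : Int))

def find_ecrypted_string_alt (string : String) : String :=
  String.ofList
    ((((pvStarts string.toList).zip
        ((pvStarts string.toList).drop 1 ++ [string.toList.length])).flatMap
      (pvPairEnc string.toList)).reverse)

-- ===== PRECONDITION & SPEC =====
def Spec_find_ecrypted_string (string : String) (out : String) : Prop := out = find_ecrypted_string_alt string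
instance (string : String) (out : String) : Decidable (Spec_find_ecrypted_string string out) := by unfold Spec_find_ecrypted_string; infer_instance

-- ===== CLAIM (what is proved, stated in full; the proofs are below) =====
def Claim_equal_find_ecrypted_string : Prop := ∀ (string : String), Dom_find_ecrypted_string string → Spec_find_ecrypted_string string (find_ecrypted_string string)

-- ===== LEMMAS AND PROOFS =====

-- reference: the forward run-length encoding of a character list
def pvRle : List Char → List Char
  | [] => []
  | c :: rest =>
    c :: (PySem.Int.toChars (1 + ((rest.takeWhile (· == c)).length : Int)) ++
      pvRle (rest.drop (rest.takeWhile (· == c)).length))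
termination_by l => l.length
decreasing_by
  simp only [List.length_cons]
  have : (rest.drop (rest.takeWhile (· == c)).length).length ≤ rest.length := by
    simp [List.length_drop]
  omega

-- ----- A equals pvRle (unchanged from the A-side analysis) -----

theorem pvAInner_eq (cs : List Char) : ∀ (fuel i : Nat) (count : Int) (c : Char),
    (cs.drop (i+1)).length ≤ fuel → cs[i]? = some c →
    pvAInner cs fuel count i =
      (count + (((cs.drop (i+1)).takeWhile (· == c)).length : Int),
       i + ((cs.drop (i+1)).takeWhile (· == c)).length) := by
  intro fuel
  induction fuel with
  | zero =>
    intro i count c hle hc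
    have hnil : cs.drop (i+1) = [] := List.eq_nil_of_length_eq_zero (by omega)
    simp [pvAInner, hnil]
  | succ m ih =>
    intro i count c hle hc
    by_cases h : i < cs.length - 1 ∧ cs[i]? = cs[i+1]?
    · obtain ⟨hlt, heq⟩ := h
      have hi1 : cs[i+1]? = some c := by rw [← heq, hc]
      obtain ⟨hlen, hval⟩ := List.getElem?_eq_some_iff.mp hi1
      have hdrop : cs.drop (i+1) = c :: cs.drop (i+2) := by
        have := List.drop_eq_getElem_cons hlen
        simpa [hval] using this
      have hle2 : (cs.drop ((i+1)+1)).length ≤ m := by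
        have h12 : (i+1)+1 = i+2 := by omega
        rw [h12]
        have : (cs.drop (i+1)).length = (cs.drop (i+2)).length + 1 := by rw [hdrop]; simp
        omega
      rw [pvAInner, if_pos ⟨hlt, heq⟩]
      rw [ih (i+1) (count+1) c hle2 hi1]
      rw [hdrop]
      have h2 : i + 1 + 1 = i + 2 := by omega
      rw [h2]
      simp only [List.takeWhile_cons, beq_self_eq_true, if_pos, List.length_cons]
      rw [Prod.mk.injEq]
      refine ⟨by push_cast; ring, by omega⟩
    · obtain ⟨hi, -⟩ := List.getElem?_eq_some_iff.mp hc
      have hk : (cs.drop (i+1)).takeWhile (· == c) = [] := by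
        by_cases h1 : i + 1 < cs.length
        · have hd : cs.drop (i+1) = cs[i+1] :: cs.drop (i+2) := List.drop_eq_getElem_cons h1
          have hne : cs[i+1] ≠ c := by
            intro he
            apply h
            refine ⟨by omega, ?_⟩
            rw [hc, List.getElem?_eq_getElem h1, he]
          rw [hd]
          simp [hne]
        · have : cs.drop (i+1) = [] := List.drop_eq_nil_of_le (by omega)
          simp [this]
      rw [pvAInner, if_neg h]
      simp [hk]

theorem pvAOuter_eq (cs : List Char) : ∀ (fuel i : Nat) (output : List Char),
    cs.length - i ≤ fuel →
    pvAOuter cs fuel output 1 i = output ++ pvRle (cs.drop i) := by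
  intro fuel
  induction fuel with
  | zero =>
    intro i output hle
    rw [List.drop_eq_nil_of_le (by omega)]
    simp [pvAOuter, pvRle]
  | succ m ih =>
    intro i output hle
    by_cases hi : i < cs.length
    · have hc : cs[i]? = some cs[i] := List.getElem?_eq_getElem hi
      set c := cs[i] with hcdef
      set k := ((cs.drop (i+1)).takeWhile (· == c)).length with hk
      rw [pvAOuter, if_pos hi]
      simp only
      have hgetd : cs.getD i default = c := by
        rw [List.getD_eq_getElem?_getD, hc]; rfl
      rw [hgetd]
      rw [pvAInner_eq cs cs.length i 1 c (by simp [List.length_drop]) hc]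
      have hdropi : cs.drop i = c :: cs.drop (i+1) := List.drop_eq_getElem_cons hi
      have hkle : k ≤ (cs.drop (i+1)).length := by
        rw [hk]; exact (List.takeWhile_prefix _).length_le
      have hrec : pvAOuter cs m ((output ++ [c]) ++ PySem.Int.toChars (1 + (k : Int))) 1 (i + k + 1) =
          ((output ++ [c]) ++ PySem.Int.toChars (1 + (k : Int))) ++ pvRle (cs.drop (i + k + 1)) := by
        apply ih
        simp [List.length_drop] at hkle
        omega
      rw [hrec]
      rw [hdropi, pvRle]
      have hdd : (cs.drop (i+1)).drop k = cs.drop (i + k + 1) := by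
        rw [List.drop_drop]; congr 1; omega
      rw [← hk, hdd]
      simp
    · rw [pvAOuter, if_neg hi]
      rw [List.drop_eq_nil_of_le (by omega)]
      simp [pvRle]

-- ----- B equals pvRle -----

-- the comprehension's filter predicate, named for the lemmas
def pvQ (l : List Char) (i : Nat) : Bool := i == 0 || l.getD i default != l.getD (i-1) default

theorem pvStarts_def (l : List Char) : pvStarts l = (List.range l.length).filter (pvQ l) := rfl

theorem filter_range_succ (n : Nat) (P : Nat → Bool) :
    (List.range (n+1)).filter P =
      (if P 0 then [0] else []) ++ ((List.range n).filter (fun i => P (i+1))).map Nat.succ := by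
  rw [List.range_succ_eq_map, List.filter_cons, List.filter_map]
  have hc : (P ∘ Nat.succ) = fun i => P (i+1) := by
    funext i; simp [Function.comp, Nat.succ_eq_add_one]
  rw [hc]
  by_cases h : P 0 = true <;> simp [h]

theorem pvQ_succ_succ (c : Char) (l : List Char) (i : Nat) :
    pvQ (c :: l) (i+2) = pvQ l (i+1) := by
  simp [pvQ]

theorem pvStarts_cons (c : Char) (l : List Char) :
    pvStarts (c :: l) =
      0 :: ((List.range l.length).filter (fun i => pvQ (c :: l) (i+1))).map Nat.succ := by
  rw [pvStarts_def]
  show (List.range (l.length + 1)).filter (pvQ (c :: l)) = _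
  rw [filter_range_succ]
  have h0 : pvQ (c :: l) 0 = true := by simp [pvQ]
  rw [h0]
  simp

theorem pvStarts_cons_cons (c d : Char) (r : List Char) :
    pvStarts (c :: d :: r) =
      0 :: ((if (d != c) then [0] else []) ++
        ((List.range r.length).filter (fun i => pvQ (d :: r) (i+1))).map Nat.succ).map Nat.succ := by
  rw [pvStarts_cons]
  congr 1
  have hlen : (d :: r).length = r.length + 1 := rfl
  rw [hlen, filter_range_succ]
  have h1 : pvQ (c :: d :: r) 1 = (d != c) := by simp [pvQ]
  have h2 : (fun i => pvQ (c :: d :: r) (i+1+1)) = fun i => pvQ (d :: r) (i+1) := by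
    funext i; exact pvQ_succ_succ c (d :: r) i
  rw [h1, h2]

-- run decomposition of the start-index list
theorem pvStarts_run (c : Char) (rest : List Char) :
    pvStarts (c :: rest) =
      0 :: (pvStarts (rest.drop (rest.takeWhile (· == c)).length)).map
            (· + ((rest.takeWhile (· == c)).length + 1)) := by
  induction rest generalizing c with
  | nil =>
    rw [pvStarts_cons]
    rfl
  | cons d r ih =>
    by_cases hd : d = c
    · subst hd
      rw [pvStarts_cons_cons]
      have hne : (d != d) = false := by simp
      rw [hne]
      simp only [Bool.false_eq_true, if_false, List.nil_append]
      have hS : ((List.range r.length).filter (fun i => pvQ (d :: r) (i+1))).map Nat.succ =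
          (pvStarts (d :: r)).drop 1 := by
        rw [pvStarts_cons]
        rfl
      rw [hS, ih d]
      simp only [List.takeWhile_cons, beq_self_eq_true, if_pos, List.length_cons,
        List.drop_succ_cons, List.drop_zero, List.map_map]
      congr 1
    · have hb : (d == c) = false := by simp [hd]
      have hne : (d != c) = true := by simp [hd]
      rw [pvStarts_cons_cons, hne]
      simp only [List.takeWhile_cons, hb, Bool.false_eq_true, if_false, List.length_nil,
        List.drop_zero]
      rw [pvStarts_cons]
      simp [Nat.succ_eq_add_one]

-- B's zip-of-starts encoding
def pvZip (cs : List Char) : List (Nat × Nat) :=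
  (pvStarts cs).zip ((pvStarts cs).drop 1 ++ [cs.length])

theorem pvZipEnc_eq_rle : ∀ (n : Nat) (cs : List Char), cs.length ≤ n →
    (pvZip cs).flatMap (pvPairEnc cs) = pvRle cs := by
  intro n
  induction n with
  | zero =>
    intro cs hle
    have : cs = [] := List.eq_nil_of_length_eq_zero (by omega)
    subst this
    simp [pvZip, pvStarts_def, pvRle]
  | succ m ih =>
    intro cs hle
    cases cs with
    | nil => simp [pvZip, pvStarts_def, pvRle]
    | cons c rest =>
      set t := (rest.takeWhile (· == c)).length with ht
      set rest' := rest.drop t with hrest'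
      have htle : t ≤ rest.length := by
        rw [ht]; exact (List.takeWhile_prefix _).length_le
      have hcsdrop : (c :: rest).drop (t + 1) = rest' := by
        simp [hrest']
      have hst : pvStarts (c :: rest) =
          0 :: (pvStarts rest').map (· + (t + 1)) := pvStarts_run c rest
      cases hre : pvStarts rest' with
      | nil =>
        have hr0 : rest' = [] := by
          cases hr : rest' with
          | nil => rfl
          | cons e es => rw [hr, pvStarts_cons] at hre; exact absurd hre (by simp)
        have htlen : t = rest.length := by
          have : rest.length - t = 0 := by
            have := congrArg List.length hr0
            simpa [hrest', List.length_drop] using this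
          omega
        unfold pvZip
        rw [hst, hre]
        simp only [List.map_nil, List.drop_succ_cons, List.drop_nil, List.nil_append,
          List.zip_cons_cons, List.zip_nil_right]
        rw [pvRle]
        simp only [← ht, ← hrest', hr0]
        simp only [pvPairEnc, List.flatMap_cons, List.flatMap_nil, List.append_nil,
          List.getD_cons_zero, pvRle]
        congr 2
        rw [htlen]
        push_cast [List.length_cons]
        omega
      | cons s0 S' =>
        have hr0 : ∃ e es, rest' = e :: es := by
          cases hr : rest' with
          | nil => rw [hr, pvStarts_def] at hre; simp at hre
          | cons e es => exact ⟨e, es, rfl⟩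
        obtain ⟨e, es, hr⟩ := hr0
        have hs0 : s0 = 0 := by
          have hre' := hre
          rw [hr, pvStarts_cons] at hre'
          injection hre' with ha _
          exact ha.symm
        have hlen : (c :: rest).length = rest'.length + (t + 1) := by
          simp [hrest', List.length_drop, List.length_cons]; omega
        have hzip : pvZip (c :: rest) =
            (0, s0 + (t+1)) :: ((pvZip rest').map (Prod.map (· + (t+1)) (· + (t+1)))) := by
          unfold pvZip
          rw [hst, hre]
          simp only [List.map_cons, List.drop_succ_cons, List.drop_zero, List.cons_append,
            List.zip_cons_cons, hlen]
          congr 1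
          have h2 : ((s0 + (t+1)) :: S'.map (· + (t+1))) = (s0 :: S').map (· + (t+1)) := by
            simp
          have h3 : (S'.map (· + (t+1))) ++ [rest'.length + (t+1)] =
              (S' ++ [rest'.length]).map (· + (t+1)) := by simp
          rw [h2, h3, List.zip_map]
        have hpenc : (fun se => pvPairEnc (c :: rest) (Prod.map (· + (t+1)) (· + (t+1)) se)) =
            pvPairEnc rest' := by
          funext se
          obtain ⟨s, e'⟩ := se
          simp only [Prod.map, pvPairEnc]
          congr 1
          · rw [List.getD_eq_getElem?_getD, List.getD_eq_getElem?_getD, ← hcsdrop,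
              List.getElem?_drop]
            have hidx : s + (t+1) = t + 1 + s := by omega
            rw [hidx]
          · congr 1
            push_cast
            omega
        have hrec : (pvZip rest').flatMap (pvPairEnc rest') = pvRle rest' := by
          apply ih
          have : rest'.length ≤ rest.length := by simp [hrest', List.length_drop]
          simp only [List.length_cons] at hle
          omega
        rw [hzip, List.flatMap_cons, List.flatMap_map]
        rw [hpenc, hrec]
        rw [pvRle]
        simp only [← ht, ← hrest']
        rw [hs0]
        simp only [pvPairEnc, List.getD_cons_zero, Nat.zero_add, List.cons_append]
        congr 3
        push_cast
        omega

-- ===== VERDICT (by name: the statement is the Claim_ definition above) =====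
theorem find_ecrypted_string_spec : Claim_equal_find_ecrypted_string := by
  intro s _
  unfold Spec_find_ecrypted_string find_ecrypted_string find_ecrypted_string_alt
  rw [pvAOuter_eq s.toList s.toList.length 0 [] (by omega)]
  rw [show (pvStarts s.toList).zip ((pvStarts s.toList).drop 1 ++ [s.toList.length]) = pvZip s.toList from rfl]
  rw [pvZipEnc_eq_rle s.toList.length s.toList (le_refl _)]
  simp
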